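-- pv_equiv track=rewrite | github.com/tadajuu/metricas_cb | metrics/Assertiveness.py | _exists_tab_chars
-- ===== SOURCE A (Python) =====
-- def _exists_tab_chars(original_text: str) -> bool:
--     """
--     Implementa um DFA reconhecer o caractere TAB em um string. O TAB pode ser o carctere "\t" ou o caractere
--     invisível que corresponde à "\t". Este DFA é necessário porque o caractere TAB "\\t" não é reconhecido
--     de forma atômica na string de entrada, mas de forma separada, ou seja, text[k] = "\\" e text[k+1] = "t".
--     Para testes:
--     test_inputs = ["\t", "\\t", "\\\t", "\\", "\\\\", "\\\\t", "\t\t", "\t\\t", "\\t\t", "\t\t\t", "\\t\t\\t",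
--                    "\\\t\t", "a", "aaaa", "aaa\taaa", "aaa\\taaa", "aaa\\t\\taaa", "aaa\\t\taaa", "aaa\t\\taaa",
--                    "aaa\t", "aaaaa\\t", "aaaaaa\t\t", "aaaaaaa\\t\\t", "aaaaa\\t\t\\t", "aaa\\taaa\taaa",
--                    "aaa\taaa\\taaa", "aaa\\taaa\\taaa", "aaa\taaa\taaa",
--                    "\\\	aaaa\\taaa	aaa\\ta	aaaaa		\\ta", "\\\aaaa\\aaa	aaataaaaaa\\a", "    ",
--                    "	\t"]
--     :param original_text: string contendo ocorrências de "\\t" ou o TAB invisível.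
--     :return: accetp: True se aceita, oiu False se não aceita a entrada no parâmetro original_text.
--     """
--     dfa = {('q0', "\\"): 'q1',
--            ('q0', "t"): 'q3',
--            ('q0', "$"): 'q3',
--            ('q0', "\t"): 'q2',
--
--            ('q1', "\\"): 'q4',
--            ('q1', "t"): 'q2',
--            ('q1', "$"): 'q3',
--            ('q1', "\t"): 'q2',
--
--            ('q2', "\\"): 'q2',
--            ('q2', "t"): 'q2',
--            ('q2', "$"): 'q2',
--            ('q2', "\t"): 'q2',
--
--            ('q3', "\\"): 'q1',
--            ('q3', "t"): 'q3',
--            ('q3', "$"): 'q3',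
--            ('q3', "\t"): 'q2',
--
--            ('q4', "\\"): 'q1',
--            ('q4', "t"): 'q2',
--            ('q4', "$"): 'q3',
--            ('q4', "\t"): 'q2'
--            }
--     accept_state = 'q2'
--     initial_state = 'q0'
--     state = initial_state
--     ANY_CHAR_EXCEPT_SPECIAL_CHARS = "$"  # representa qualquer caracteres exceto "\\" e "t"
--     SPECIAL_CHARS = ["\\", "t", "\t"]
--     invisible_TAB = "    "
--     if original_text == invisible_TAB:  # caso especial quando a entrada só tem um TAB invisível.
--         text = "\t"
--     text = list(original_text)
--     i: int = 0
--     accept = False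
--     while i < len(text):
--         if text[i] not in SPECIAL_CHARS:
--             text[i] = ANY_CHAR_EXCEPT_SPECIAL_CHARS
--         state = dfa[(state, text[i])]
--         if state == accept_state:
--             accept = True
--             break
--         i += 1
--     return accept
-- ===== SOURCE B (Python) =====
-- def _exists_tab_chars(original_text: str) -> bool:
--     # The DFA accepts exactly when the text contains a literal TAB character
--     # or a backslash immediately followed by 't'.
--     return "\t" in original_text or "\\t" in original_text
-- ===== Notes on version B (the rewrite author's own statement) =====
-- stated objective: simpler
-- what changed: Replaced the hand-built 5-state DFA table, character normalisation and index loop by two substring membership tests (literal tab, or backslash followed by 't'), dropping the dead invisible_TAB branch that is overwritten before use.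
import Mathlib
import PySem

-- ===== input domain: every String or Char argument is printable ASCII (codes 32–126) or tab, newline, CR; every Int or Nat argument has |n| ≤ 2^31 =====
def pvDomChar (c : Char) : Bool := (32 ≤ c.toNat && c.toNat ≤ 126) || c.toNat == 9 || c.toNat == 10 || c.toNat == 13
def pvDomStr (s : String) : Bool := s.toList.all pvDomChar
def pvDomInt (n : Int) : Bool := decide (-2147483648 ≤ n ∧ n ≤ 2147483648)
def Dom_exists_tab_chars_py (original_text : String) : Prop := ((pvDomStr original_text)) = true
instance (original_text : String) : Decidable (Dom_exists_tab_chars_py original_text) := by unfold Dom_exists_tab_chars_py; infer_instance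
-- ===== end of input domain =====

-- B replaces A's 5-state DFA table and index loop by two substring membership tests (simpler).

-- ===== PORT A =====
-- A's DFA transition table, built by insertion in source order
def pvDfaA : PySem.Dict (String × Char) String :=
  (((((((((((((((((((PySem.Dict.empty.insert ("q0", '\\') "q1").insert ("q0", 't') "q3").insert
    ("q0", '$') "q3").insert ("q0", '\t') "q2").insert
    ("q1", '\\') "q4").insert ("q1", 't') "q2").insert ("q1", '$') "q3").insert ("q1", '\t') "q2").insert
    ("q2", '\\') "q2").insert ("q2", 't') "q2").insert ("q2", '$') "q2").insert ("q2", '\t') "q2").insert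
    ("q3", '\\') "q1").insert ("q3", 't') "q3").insert ("q3", '$') "q3").insert ("q3", '\t') "q2").insert
    ("q4", '\\') "q1").insert ("q4", 't') "q2").insert ("q4", '$') "q3").insert ("q4", '\t') "q2"

-- A's while loop: walk the char list, normalising non-special chars to '$' (the text[i] mutation),
-- stepping the DFA, and breaking with accept=True as soon as the accept state 'q2' is reached.
-- The dict lookup uses getD with the current state as (unreachable) default: after the normalisation
-- the key (state, char) is always present, so Python's KeyError can never fire.
def pvLoopA (state : String) (text : List Char) : Bool :=
  match text with
  | [] => false
  | c :: rest =>
      let c' := if ¬ (c ∈ ['\\', 't', '\t']) then '$' else c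
      let state' := (pvDfaA.get? (state, c')).getD state
      if state' == "q2" then true else pvLoopA state' rest

def exists_tab_chars_py (original_text : String) : Bool :=
  -- A's `if original_text == invisible_TAB: text = "\t"` is dead code: `text` is unconditionally
  -- overwritten by list(original_text) on the next line, so it is not ported.
  pvLoopA "q0" original_text.toList

-- ===== PORT B =====
def exists_tab_chars_py_alt (original_text : String) : Bool :=
  PySem.Str.isIn "\t" original_text || PySem.Str.isIn "\\t" original_text

-- ===== PRECONDITION & SPEC =====
def Spec_exists_tab_chars_py (original_text : String) (out : Bool) : Prop := out = exists_tab_chars_py_alt original_text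
instance (original_text : String) (out : Bool) : Decidable (Spec_exists_tab_chars_py original_text out) := by unfold Spec_exists_tab_chars_py; infer_instance

-- ===== CLAIM (what is proved, stated in full; the proofs are below) =====
def Claim_equal_exists_tab_chars_py : Prop := ∀ (original_text : String), Dom_exists_tab_chars_py original_text → Spec_exists_tab_chars_py original_text (exists_tab_chars_py original_text)

-- ===== LEMMAS AND PROOFS =====

-- abstract one-pass scanner: `prev` = "the previous character was a backslash"
def pvScan (prev : Bool) (cs : List Char) : Bool :=
  match cs with
  | [] => false
  | c :: rest =>
      if c = '\t' then true
      else if prev && c = 't' then true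
      else pvScan (c = '\\') rest

-- A's DFA loop computes pvScan: states q1/q4 mean "just read a backslash", q0/q3 mean "did not"
lemma pvLoopA_eq_pvScan : ∀ (cs : List Char) (state : String) (b : Bool),
    (if b then state = "q1" ∨ state = "q4" else state = "q0" ∨ state = "q3") →
    pvLoopA state cs = pvScan b cs := by
  intro cs
  induction cs with
  | nil => intro state b _; rfl
  | cons c rest ih =>
    intro state b hb
    by_cases hc1 : c = '\t'
    · subst hc1
      cases b <;> rcases hb with h | h <;> subst h <;>
        simp only [show ∀ r, pvScan true ('\t' :: r) = true from fun _ => rfl,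
                   show ∀ r, pvScan false ('\t' :: r) = true from fun _ => rfl] <;> rfl
    · by_cases hc2 : c = 't'
      · subst hc2
        cases b <;> rcases hb with h | h <;> subst h
        · rw [show pvLoopA "q0" ('t' :: rest) = pvLoopA "q3" rest from rfl,
              show pvScan false ('t' :: rest) = pvScan false rest from by simp [pvScan]]
          exact ih "q3" false (by simp)
        · rw [show pvLoopA "q3" ('t' :: rest) = pvLoopA "q3" rest from rfl,
              show pvScan false ('t' :: rest) = pvScan false rest from by simp [pvScan]]
          exact ih "q3" false (by simp)
        · rw [show pvLoopA "q1" ('t' :: rest) = true from rfl]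
          simp [pvScan]
        · rw [show pvLoopA "q4" ('t' :: rest) = true from rfl]
          simp [pvScan]
      · by_cases hc3 : c = '\\'
        · subst hc3
          have hscan : ∀ b : Bool, pvScan b ('\\' :: rest) = pvScan true rest := by
            intro b; simp [pvScan]
          cases b <;> rcases hb with h | h <;> subst h <;> rw [hscan]
          · rw [show pvLoopA "q0" ('\\' :: rest) = pvLoopA "q1" rest from rfl]
            exact ih "q1" true (by simp)
          · rw [show pvLoopA "q3" ('\\' :: rest) = pvLoopA "q1" rest from rfl]
            exact ih "q1" true (by simp)
          · rw [show pvLoopA "q1" ('\\' :: rest) = pvLoopA "q4" rest from rfl]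
            exact ih "q4" true (by simp)
          · rw [show pvLoopA "q4" ('\\' :: rest) = pvLoopA "q1" rest from rfl]
            exact ih "q1" true (by simp)
        · have hmem : ¬ (c ∈ ['\\', 't', '\t']) := by simp [hc1, hc2, hc3]
          have hscan : pvScan b (c :: rest) = pvScan false rest := by
            simp [pvScan, hc1, hc2, hc3]
          rw [hscan]
          cases b <;> rcases hb with h | h <;> subst h <;>
            · simp only [pvLoopA]
              rw [if_pos hmem]
              exact ih "q3" false (by simp)

lemma pv_singleton_prefix (b : Char) (rest : List Char) : [b] <+: rest ↔ rest.head? = some b := by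
  cases rest with
  | nil => simp
  | cons h t => simp [List.cons_prefix_cons]; exact eq_comm

lemma pv_pair_infix_cons (a b c : Char) (rest : List Char) :
    [a, b] <:+: (c :: rest) ↔ (c = a ∧ rest.head? = some b) ∨ [a, b] <:+: rest := by
  rw [List.infix_cons_iff, List.cons_prefix_cons, pv_singleton_prefix]
  constructor
  · rintro (⟨h1, h2⟩ | h)
    · exact Or.inl ⟨h1.symm, h2⟩
    · exact Or.inr h
  · rintro (⟨h1, h2⟩ | h)
    · exact Or.inl ⟨h1.symm, h2⟩
    · exact Or.inr h

lemma pvScan_iff : ∀ (cs : List Char) (prev : Bool),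
    pvScan prev cs = true ↔
      '\t' ∈ cs ∨ ['\\', 't'] <:+: cs ∨ (prev = true ∧ cs.head? = some 't') := by
  intro cs
  induction cs with
  | nil => intro prev; simp [pvScan]
  | cons c rest ih =>
    intro prev
    rw [show pvScan prev (c :: rest) = (if c = '\t' then true
      else if prev && c = 't' then true else pvScan (c = '\\') rest) from rfl]
    rw [List.mem_cons, pv_pair_infix_cons]
    by_cases hc1 : c = '\t'
    · simp [hc1]
    · by_cases hc2 : c = 't'
      · subst hc2
        cases prev <;> simp [hc1, ih]
      · by_cases hc3 : c = '\\'
        · subst hc3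
          simp [hc1, hc2, ih]
          cases hh : rest.head? with
          | none => simp
          | some r =>
            by_cases hr : r = 't' <;> simp [hr]
        · simp [hc1, hc2, hc3, ih, Ne.symm hc1]

lemma pv_singleton_infix (a : Char) (cs : List Char) : [a] <:+: cs ↔ a ∈ cs := by
  constructor
  · rintro ⟨s, t, h⟩
    subst h; simp
  · intro h
    obtain ⟨s, t, h⟩ := List.append_of_mem h
    exact ⟨s, t, by simp [h]⟩

-- ===== VERDICT (by name: the statement is the Claim_ definition above) =====
theorem exists_tab_chars_py_spec : Claim_equal_exists_tab_chars_py := by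
  intro s _
  unfold Spec_exists_tab_chars_py exists_tab_chars_py exists_tab_chars_py_alt
  rw [pvLoopA_eq_pvScan s.toList "q0" false (by simp)]
  rw [Bool.eq_iff_iff]
  simp only [Bool.or_eq_true, PySem.Str.isIn_iff_infix]
  rw [pvScan_iff]
  rw [show ("\t".toList : List Char) = ['\t'] from rfl,
      show ("\\t".toList : List Char) = ['\\', 't'] from rfl,
      pv_singleton_infix]
  simp
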